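-- pv_equiv track=rewrite | github.com/Kimchanghee/NewshoppingShorts | ui/panels/settings_tab.py | _resolve_creator_level
-- ===== SOURCE A (Python) =====
-- def _resolve_creator_level(used_count: int):
--     """Return gamified community level and next target."""
--     levels = [
--         (0, "새싹 메이커", 5),
--         (5, "꾸준한 크리에이터", 20),
--         (20, "쇼츠 장인", 50),
--         (50, "커뮤니티 리더", 100),
--         (100, "레전드 빌더", None),
--     ]
--     current = levels[0]
--     for level in levels:
--         if used_count >= level[0]:
--             current = level
--         else:
--             break
--     return current[1], current[2]
-- ===== SOURCE B (Python) =====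
-- def _resolve_creator_level(used_count: int):
--     """Return gamified community level and next target."""
--     thresholds = [0, 5, 20, 50, 100]
--     names = ["새싹 메이커", "꾸준한 크리에이터", "쇼츠 장인", "커뮤니티 리더", "레전드 빌더"]
--     targets = [5, 20, 50, 100, None]
--     # binary search for the rightmost threshold <= used_count (bisect_right)
--     lo, hi = 0, len(thresholds)
--     while lo < hi:
--         mid = (lo + hi) // 2
--         if thresholds[mid] <= used_count:
--             lo = mid + 1
--         else:
--             hi = mid
--     idx = max(0, lo - 1)
--     return names[idx], targets[idx]
-- ===== Notes on version B (the rewrite author's own statement) =====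
-- stated objective: alternative
-- what changed: Replaced the scan-with-break over (threshold,name,target) tuples by a hand-written binary search (bisect_right) over a parallel thresholds table, clamping the index so negative counts map to the first tier.
import Mathlib
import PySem

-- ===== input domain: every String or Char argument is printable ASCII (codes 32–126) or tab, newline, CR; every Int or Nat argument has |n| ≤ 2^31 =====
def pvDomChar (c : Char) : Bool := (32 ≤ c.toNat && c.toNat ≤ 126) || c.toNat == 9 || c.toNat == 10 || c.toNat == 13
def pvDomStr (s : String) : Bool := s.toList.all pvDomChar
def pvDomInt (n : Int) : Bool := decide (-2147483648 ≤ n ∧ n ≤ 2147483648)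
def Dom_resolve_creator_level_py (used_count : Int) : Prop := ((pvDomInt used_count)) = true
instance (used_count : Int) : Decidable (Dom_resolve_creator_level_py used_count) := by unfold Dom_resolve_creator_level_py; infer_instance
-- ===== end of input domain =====

-- B replaces A's scan-with-break by a hand-written binary search over a parallel thresholds table (alternative decomposition, same result).

-- ===== PORT A =====
-- the for-loop with break, carrying `current`
def pvLoopA (used_count : Int) : List (Int × String × Option Int) → (Int × String × Option Int) → (Int × String × Option Int)
  | [], current => current
  | level :: rest, current =>
      if used_count ≥ level.1 then pvLoopA used_count rest level else current

def resolve_creator_level_py (used_count : Int) : String × Option Int :=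
  let levels : List (Int × String × Option Int) :=
    [(0, "새싹 메이커", some 5), (5, "꾸준한 크리에이터", some 20), (20, "쇼츠 장인", some 50),
     (50, "커뮤니티 리더", some 100), (100, "레전드 빌더", none)]
  let current := pvLoopA used_count levels (0, "새싹 메이커", some 5)
  (current.2.1, current.2.2)

-- ===== PORT B =====
-- the while-loop binary search; thresholds[mid] is always in range, so getD is exact
def pvBisect (ts : List Int) (x : Int) (lo hi : Nat) : Nat :=
  if _h : lo < hi then
    let mid := (lo + hi) / 2
    if ts.getD mid 0 ≤ x then pvBisect ts x (mid + 1) hi else pvBisect ts x lo mid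
  else lo
termination_by hi - lo
decreasing_by all_goals omega

def resolve_creator_level_py_alt (used_count : Int) : String × Option Int :=
  let thresholds : List Int := [0, 5, 20, 50, 100]
  let names : List String := ["새싹 메이커", "꾸준한 크리에이터", "쇼츠 장인", "커뮤니티 리더", "레전드 빌더"]
  let targets : List (Option Int) := [some 5, some 20, some 50, some 100, none]
  let lo := pvBisect thresholds used_count 0 thresholds.length
  let idx : Nat := (max 0 ((lo : Int) - 1)).toNat
  (names.getD idx "", targets.getD idx none)

-- ===== PRECONDITION & SPEC =====
def Spec_resolve_creator_level_py (used_count : Int) (out : String × Option Int) : Prop := out = resolve_creator_level_py_alt used_count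
instance (used_count : Int) (out : String × Option Int) : Decidable (Spec_resolve_creator_level_py used_count out) := by unfold Spec_resolve_creator_level_py; infer_instance

-- ===== CLAIM (what is proved, stated in full; the proofs are below) =====
def Claim_equal_resolve_creator_level_py : Prop := ∀ (used_count : Int), Dom_resolve_creator_level_py used_count → Spec_resolve_creator_level_py used_count (resolve_creator_level_py used_count)

-- ===== LEMMAS AND PROOFS =====

lemma pvBisect_lt0 (x : Int) (h : x < 0) : pvBisect [0,5,20,50,100] x 0 5 = 0 := by
  have h20 : ¬ (20:Int) ≤ x := by omega
  have h0 : ¬ (0:Int) ≤ x := by omega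
  have h5 : ¬ (5:Int) ≤ x := by omega
  rw [pvBisect.eq_def]; norm_num [h20]
  rw [pvBisect.eq_def]; norm_num [h5]
  rw [pvBisect.eq_def]; norm_num [h0]
  rw [pvBisect.eq_def]; norm_num

lemma pvBisect_i0 (x : Int) (h0 : 0 ≤ x) (h : x < 5) : pvBisect [0,5,20,50,100] x 0 5 = 1 := by
  have h20 : ¬ (20:Int) ≤ x := by omega
  have h5 : ¬ (5:Int) ≤ x := by omega
  rw [pvBisect.eq_def]; norm_num [h20]
  rw [pvBisect.eq_def]; norm_num [h5]
  rw [pvBisect.eq_def]; norm_num [h0]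
  rw [pvBisect.eq_def]; norm_num

lemma pvBisect_i1 (x : Int) (h5 : 5 ≤ x) (h : x < 20) : pvBisect [0,5,20,50,100] x 0 5 = 2 := by
  have h20 : ¬ (20:Int) ≤ x := by omega
  rw [pvBisect.eq_def]; norm_num [h20]
  rw [pvBisect.eq_def]; norm_num [h5]
  rw [pvBisect.eq_def]; norm_num

lemma pvBisect_i2 (x : Int) (h20 : 20 ≤ x) (h : x < 50) : pvBisect [0,5,20,50,100] x 0 5 = 3 := by
  have h100 : ¬ (100:Int) ≤ x := by omega
  have h50 : ¬ (50:Int) ≤ x := by omega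
  rw [pvBisect.eq_def]; norm_num [h20]
  rw [pvBisect.eq_def]; norm_num [h100]
  rw [pvBisect.eq_def]; norm_num [h50]
  rw [pvBisect.eq_def]; norm_num

lemma pvBisect_i3 (x : Int) (h50 : 50 ≤ x) (h : x < 100) : pvBisect [0,5,20,50,100] x 0 5 = 4 := by
  have h100 : ¬ (100:Int) ≤ x := by omega
  have h20 : (20:Int) ≤ x := by omega
  rw [pvBisect.eq_def]; norm_num [h20]
  rw [pvBisect.eq_def]; norm_num [h100]
  rw [pvBisect.eq_def]; norm_num [h50]
  rw [pvBisect.eq_def]; norm_num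

lemma pvBisect_i4 (x : Int) (h100 : 100 ≤ x) : pvBisect [0,5,20,50,100] x 0 5 = 5 := by
  have h20 : (20:Int) ≤ x := by omega
  rw [pvBisect.eq_def]; norm_num [h20]
  rw [pvBisect.eq_def]; norm_num [h100]
  rw [pvBisect.eq_def]; norm_num

-- ===== VERDICT (by name: the statement is the Claim_ definition above) =====
theorem resolve_creator_level_py_spec : Claim_equal_resolve_creator_level_py := by
  intro n _
  unfold Spec_resolve_creator_level_py resolve_creator_level_py resolve_creator_level_py_alt
  rcases lt_or_ge n 0 with h0 | h0
  · norm_num [pvBisect_lt0 n h0, pvLoopA, show ¬ (0:Int) ≤ n from by omega]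
  rcases lt_or_ge n 5 with h5 | h5
  · norm_num [pvBisect_i0 n h0 h5, pvLoopA, h0, show ¬ (5:Int) ≤ n from by omega]
  rcases lt_or_ge n 20 with h20 | h20
  · norm_num [pvBisect_i1 n h5 h20, pvLoopA, h0, h5, show ¬ (20:Int) ≤ n from by omega]
  rcases lt_or_ge n 50 with h50 | h50
  · norm_num [pvBisect_i2 n h20 h50, pvLoopA, h0, h5, h20, show ¬ (50:Int) ≤ n from by omega]
    exact ⟨rfl, rfl⟩
  rcases lt_or_ge n 100 with h100 | h100
  · norm_num [pvBisect_i3 n h50 h100, pvLoopA, h0, h5, h20, h50, show ¬ (100:Int) ≤ n from by omega]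
    exact ⟨rfl, rfl⟩
  · norm_num [pvBisect_i4 n h100, pvLoopA, h0, h5, h20, h50, h100]
    exact ⟨rfl, rfl⟩
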